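-- pv_equiv track=rewrite | github.com/BasilRommens/Motif-finding | scoring.py | instances_to_count_matrix
-- ===== SOURCE A (Python) =====
-- BASES = ["A", "T", "C", "G"]
--
-- def instances_to_count_matrix(instances):
--     """
--     Convert known instances to count matrix (slide 17)
--     :param instances: Vector of strings of the same length (containing only the
--     letters A, T, C and G)
--     :return: A dict with 4 entries (A, T, C and G), with each entry containing a
--     list of the occurances of that letter on given position
--
--
--     >>> instances_to_count_matrix(["ACC", "ATG"])
--     {'A': [2, 0, 0], 'T': [0, 1, 0], 'C': [0, 1, 1], 'G': [0, 0, 1]}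
--     """
--     assert not any(len(instances[0]) != len(i) for i in instances)
--
--     motif_length = len(instances[0])
--     count_matrix = {base: [0] * motif_length for base in BASES}
--     for instance in instances:
--         for i in range(len(instance)):
--             base = instance[i]
--             count_matrix[base][i] += 1
--     return count_matrix
-- ===== SOURCE B (Python) =====
-- BASES = ["A", "T", "C", "G"]
--
-- def instances_to_count_matrix(instances):
--     assert not any(len(instances[0]) != len(i) for i in instances)
--     motif_length = len(instances[0])
--     return {base: [sum(inst[i] == base for inst in instances)
--                    for i in range(motif_length)]
--             for base in BASES}
-- ===== Notes on version B (the rewrite author's own statement) =====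
-- stated objective: simpler
-- what changed: A mutates a pre-zeroed dict row by row with per-position increments; B builds the result directly with a dict comprehension that counts, per base and per position, how many instances carry that base there (no mutation, no pre-allocation).
import Mathlib
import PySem

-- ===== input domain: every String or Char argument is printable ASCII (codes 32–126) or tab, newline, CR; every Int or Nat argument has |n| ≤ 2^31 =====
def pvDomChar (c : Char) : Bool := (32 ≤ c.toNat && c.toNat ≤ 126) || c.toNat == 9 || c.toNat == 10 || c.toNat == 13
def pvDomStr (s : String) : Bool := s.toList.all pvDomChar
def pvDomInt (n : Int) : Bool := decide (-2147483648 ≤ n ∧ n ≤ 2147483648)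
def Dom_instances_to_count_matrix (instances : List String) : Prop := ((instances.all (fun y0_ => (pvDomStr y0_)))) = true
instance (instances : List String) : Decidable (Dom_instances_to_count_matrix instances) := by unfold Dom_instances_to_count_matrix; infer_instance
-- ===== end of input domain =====

-- B builds the count matrix directly by counting, per base and position, instead of
-- mutating a pre-zeroed dict; equal cost, no mutation. Equivalence is proved on Pre_
-- (A's normal returns); where A raises KeyError on foreign characters B returns counts.

-- ===== PORT A =====
-- dict[str, list[int]] is the association list List (String × List Int); 'count_matrix[base][i] += 1'
-- is an in-place update of the first (only) matching key (pvAmod) with an in-range list set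
-- (indices are in range on every input admitted by Pre_; out of range Python raises).
def pvAmod (d : List (String × List Int)) (k : String) (f : List Int → List Int) :
    List (String × List Int) :=
  match d with
  | [] => []
  | (k', v) :: rest => if k' = k then (k', f v) :: rest else (k', v) :: pvAmod rest k f

def instances_to_count_matrix (instances : List String) : List (String × List Int) :=
  -- the assert and instances[0] raise outside Pre_; on Pre_ they are no-ops
  let motif_length := (instances.headD "").toList.length
  let count_matrix := (["A", "T", "C", "G"] : List String).map
    (fun base => (base, List.replicate motif_length (0 : Int)))
  instances.foldl
    (fun d inst =>
      (List.range inst.toList.length).foldl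
        (fun d i =>
          pvAmod d (String.ofList [inst.toList.getD i ' '])
            (fun v => v.set i (v.getD i 0 + 1)))
        d)
    count_matrix

-- ===== PORT B =====
-- sum(inst[i] == base for inst in instances), a left fold adding 0/1
def pvColCount (instances : List String) (base : String) (i : Nat) : Int :=
  instances.foldl
    (fun acc inst => acc + (if String.ofList [inst.toList.getD i ' '] = base then 1 else 0)) 0

def instances_to_count_matrix_alt (instances : List String) : List (String × List Int) :=
  let motif_length := (instances.headD "").toList.length
  (["A", "T", "C", "G"] : List String).map
    (fun base => (base, (List.range motif_length).map (fun i => pvColCount instances base i)))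

-- ===== PRECONDITION & SPEC =====
-- Pre_: exactly the inputs on which Python A returns: a non-empty list (else IndexError),
-- all strings of the first string's length (else AssertionError), every character one of
-- A,T,C,G (else KeyError).
def Pre_instances_to_count_matrix (instances : List String) : Prop :=
  instances ≠ [] ∧
  ∀ s ∈ instances, s.toList.length = (instances.headD "").toList.length ∧
    (s.toList.all (fun c => c ∈ (['A', 'T', 'C', 'G'] : List Char))) = true
instance (instances : List String) : Decidable (Pre_instances_to_count_matrix instances) := by
  unfold Pre_instances_to_count_matrix; infer_instance
def pvWitness_instances_to_count_matrix : List String := ["ACC", "ATG"]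

def Spec_instances_to_count_matrix (instances : List String) (out : List (String × List Int)) : Prop := out = instances_to_count_matrix_alt instances
instance (instances : List String) (out : List (String × List Int)) : Decidable (Spec_instances_to_count_matrix instances out) := by unfold Spec_instances_to_count_matrix; infer_instance

-- ===== CLAIM (what is proved, stated in full; the proofs are below) =====
def Claim_equal_instances_to_count_matrix : Prop := ∀ (instances : List String), Dom_instances_to_count_matrix instances → Pre_instances_to_count_matrix instances → Spec_instances_to_count_matrix instances (instances_to_count_matrix instances)

-- ===== LEMMAS AND PROOFS =====

-- canonical shape of A's dict state: the four bases, each a length-m row given by a function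
def pvMat (m : Nat) (F : String → Nat → Int) : List (String × List Int) :=
  (["A", "T", "C", "G"] : List String).map (fun b => (b, (List.range m).map (F b)))

theorem pvMat_congr (m : Nat) (F F' : String → Nat → Int)
    (h : ∀ b i, i < m → F b i = F' b i) : pvMat m F = pvMat m F' := by
  unfold pvMat
  apply List.map_congr_left; intro b _
  simp only [Prod.mk.injEq, true_and]
  apply List.map_congr_left; intro i hi
  exact h b i (List.mem_range.mp hi)

theorem pvSet_map_range (m k : Nat) (g : Nat → Int) (v : Int) :
    ((List.range m).map g).set k v
      = (List.range m).map (fun i => if i = k then v else g i) := by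
  apply List.ext_getElem
  · simp
  · intro j hj _
    simp only [List.getElem_set, List.getElem_map, List.getElem_range]
    by_cases h : k = j
    · simp [h]
    · simp [h, Ne.symm h]

theorem pvAmod_mat (m k : Nat) (F : String → Nat → Int) (s : String)
    (hs : s ∈ (["A", "T", "C", "G"] : List String)) (hk : k < m) :
    pvAmod (pvMat m F) s (fun v => v.set k (v.getD k 0 + 1))
      = pvMat m (fun b i => if b = s ∧ i = k then F b i + 1 else F b i) := by
  have hrow : ∀ b : String,
      (List.map (F b) (List.range m)).set k ((Option.map (F b) (List.range m)[k]?).getD 0 + 1)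
        = List.map (fun i => if i = k then F b i + 1 else F b i) (List.range m) := by
    intro b
    have hsome : (List.range m)[k]? = some k := by simp [hk]
    rw [hsome]
    simp only [Option.map_some, Option.getD_some]
    rw [pvSet_map_range]
    apply List.map_congr_left; intro i _; by_cases hik : i = k <;> simp [hik]
  fin_cases hs <;>
  · simp only [pvMat, List.map_cons, List.map_nil]
    simp [pvAmod, hrow]

theorem pvBaseStr {c : Char} (h : c ∈ (['A', 'T', 'C', 'G'] : List Char)) :
    String.ofList [c] ∈ (["A", "T", "C", "G"] : List String) := by
  fin_cases h <;> decide

theorem pvInner (r : List Char) (m : Nat) (F : String → Nat → Int)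
    (hlen : r.length = m)
    (hch : ∀ c ∈ r, String.ofList [c] ∈ (["A", "T", "C", "G"] : List String))
    (n : Nat) (hn : n ≤ m) :
    (List.range n).foldl
        (fun d i => pvAmod d (String.ofList [r.getD i ' ']) (fun v => v.set i (v.getD i 0 + 1)))
        (pvMat m F)
      = pvMat m (fun b i => if i < n ∧ String.ofList [r.getD i ' '] = b then F b i + 1 else F b i) := by
  induction n with
  | zero =>
    simp only [List.range_zero, List.foldl_nil]
    apply pvMat_congr; intro b i _; simp
  | succ n ih =>
    rw [List.range_succ, List.foldl_append, ih (by omega), List.foldl_cons, List.foldl_nil]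
    have hmem : String.ofList [r.getD n ' '] ∈ (["A", "T", "C", "G"] : List String) := by
      apply hch
      have hn' : n < r.length := by omega
      rw [List.getD_eq_getElem r ' ' hn']
      exact List.getElem_mem hn'
    rw [pvAmod_mat m n _ _ hmem (by omega)]
    apply pvMat_congr; intro b i _
    by_cases hin : i = n
    · subst hin
      by_cases hb : String.ofList [r.getD i ' '] = b
      · rw [if_pos ⟨hb.symm, rfl⟩, if_neg (fun h => by omega : ¬(i < i ∧ _)),
            if_pos ⟨by omega, hb⟩]
      · rw [if_neg (fun h => hb h.1.symm), if_neg (fun h => by omega : ¬(i < i ∧ _)),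
            if_neg (fun h => hb h.2)]
    · have h2 : (i < n + 1) ↔ (i < n) := by omega
      by_cases hlt : i < n ∧ String.ofList [r.getD i ' '] = b
      · rw [if_neg (fun h => hin h.2), if_pos hlt, if_pos ⟨h2.mpr hlt.1, hlt.2⟩]
      · rw [if_neg (fun h => hin h.2), if_neg hlt,
            if_neg (fun h => hlt ⟨h2.mp h.1, h.2⟩)]

theorem pvFoldlAddShift (l : List String) (g : String → Int) (a : Int) :
    l.foldl (fun acc x => acc + g x) a = a + l.foldl (fun acc x => acc + g x) 0 := by
  induction l generalizing a with
  | nil => simp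
  | cons x xs ih => simp only [List.foldl_cons]; rw [ih, ih (0 + g x)]; ring

theorem pvOuter (rows : List String) (m : Nat) (F : String → Nat → Int)
    (h : ∀ r ∈ rows, r.toList.length = m ∧
          ∀ c ∈ r.toList, String.ofList [c] ∈ (["A", "T", "C", "G"] : List String)) :
    rows.foldl
        (fun d inst =>
          (List.range inst.toList.length).foldl
            (fun d i => pvAmod d (String.ofList [inst.toList.getD i ' '])
              (fun v => v.set i (v.getD i 0 + 1))) d)
        (pvMat m F)
      = pvMat m (fun b i => F b i + pvColCount rows b i) := by
  induction rows generalizing F with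
  | nil =>
    simp only [List.foldl_nil]
    apply pvMat_congr; intro b i _; simp [pvColCount]
  | cons r rest ih =>
    obtain ⟨hlen, hch⟩ := h r (List.mem_cons_self ..)
    simp only [List.foldl_cons]
    rw [hlen, pvInner r.toList m F hlen hch m (le_refl m)]
    rw [ih _ (fun x hx => h x (List.mem_cons_of_mem _ hx))]
    apply pvMat_congr; intro b i him
    have hcnt : pvColCount (r :: rest) b i
        = (if String.ofList [r.toList.getD i ' '] = b then 1 else 0) + pvColCount rest b i := by
      simp only [pvColCount, List.foldl_cons]
      rw [pvFoldlAddShift]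
      simp only [zero_add]
    rw [hcnt]
    by_cases hb : String.ofList [r.toList.getD i ' '] = b
    · rw [if_pos ⟨him, hb⟩, if_pos hb]; ring
    · rw [if_neg (fun h => hb h.2), if_neg hb]; ring

-- ===== VERDICT (by name: the statement is the Claim_ definition above) =====
theorem instances_to_count_matrix_spec : Claim_equal_instances_to_count_matrix := by
  intro instances _ hpre
  obtain ⟨hne, hall⟩ := hpre
  unfold Spec_instances_to_count_matrix instances_to_count_matrix instances_to_count_matrix_alt
  simp only []
  have hinit : (["A", "T", "C", "G"] : List String).map
      (fun base => (base, List.replicate (instances.headD "").toList.length (0 : Int)))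
      = pvMat (instances.headD "").toList.length (fun _ _ => 0) := by
    unfold pvMat
    apply List.map_congr_left; intro b _
    rw [List.map_const', List.length_range]
  rw [hinit, pvOuter instances _ _ (fun r hr => ⟨(hall r hr).1,
      fun c hc => pvBaseStr (by
        have := List.all_eq_true.mp (hall r hr).2 c hc
        simpa using this)⟩)]
  unfold pvMat pvColCount
  simp
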